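-- pv_equiv track=rewrite | github.com/guiyinan/agomTradePro | scripts/check_module_cycles.py | find_bidirectional_pairs
-- ===== SOURCE A (Python) =====
-- def find_bidirectional_pairs(graph: dict[str, set[str]]) -> list[tuple[str, str]]:
--     pairs: list[tuple[str, str]] = []
--     for source in sorted(graph):
--         for target in sorted(graph[source]):
--             pair = tuple(sorted((source, target)))
--             if source < target and source in graph.get(target, set()):
--                 pairs.append(pair)
--     return pairs
-- ===== SOURCE B (Python) =====
-- def find_bidirectional_pairs(graph):
--     counts = {}
--     for source, targets in graph.items():
--         for target in targets:
--             if source != target: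
--                 pair = (source, target) if source < target else (target, source)
--                 counts[pair] = counts.get(pair, 0) + 1
--     return sorted(pair for pair, n in counts.items() if n == 2)
-- ===== Notes on version B (the rewrite author's own statement) =====
-- stated objective: alternative
-- what changed: Replaces A's per-edge reverse-membership test inside nested sorted loops by one flat counting pass over all directed non-loop edges keyed by the canonical (min,max) pair, then extracts the pairs counted twice and sorts once at the end.
import Mathlib
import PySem

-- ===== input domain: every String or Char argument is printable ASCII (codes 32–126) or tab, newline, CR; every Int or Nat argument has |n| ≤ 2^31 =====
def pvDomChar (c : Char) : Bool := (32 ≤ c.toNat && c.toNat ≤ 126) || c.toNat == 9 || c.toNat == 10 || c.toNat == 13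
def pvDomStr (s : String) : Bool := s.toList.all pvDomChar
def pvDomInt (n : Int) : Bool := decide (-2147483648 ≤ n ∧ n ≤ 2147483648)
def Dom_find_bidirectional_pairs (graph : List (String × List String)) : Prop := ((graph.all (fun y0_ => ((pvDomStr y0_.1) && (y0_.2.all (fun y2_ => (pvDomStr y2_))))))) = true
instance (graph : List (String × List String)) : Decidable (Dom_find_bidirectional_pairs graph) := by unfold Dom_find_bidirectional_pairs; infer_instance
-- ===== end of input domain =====

-- B replaces A's per-edge reverse-membership test inside nested sorted loops by a single
-- counting pass over canonicalised non-loop edges followed by one extraction + final sort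
-- (objective: alternative decomposition; not claimed faster).

-- ===== PORT A =====
-- 'graph[source]' cannot raise (source ranges over the keys), so it is ported as getD.
def find_bidirectional_pairs (graph : List (String × List String)) : List (String × String) :=
  let d := PySem.Dict.mk graph
  (PySem.List.sorted d.keys (fun k => k) false).foldl (fun pairs source =>
    (PySem.List.sorted (d.getD source []) (fun t => t) false).foldl (fun pairs target =>
      let pair := if source < target then (source, target) else (target, source)
      if decide (source < target) && (d.getD target []).contains source
      then pairs ++ [pair] else pairs) pairs) []

-- ===== PORT B =====
def find_bidirectional_pairs_alt (graph : List (String × List String)) : List (String × String) :=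
  let counts := graph.foldl (fun d p =>
    p.2.foldl (fun d target =>
      if p.1 ≠ target then
        let pair := if p.1 < target then (p.1, target) else (target, p.1)
        d.insert pair (d.getD pair 0 + 1)
      else d) d) (PySem.Dict.empty : PySem.Dict (String × String) Int)
  PySem.List.sorted2 (counts.items.filterMap (fun kn => if kn.2 = 2 then some kn.1 else none))
    Prod.fst Prod.snd false

-- ===== PRECONDITION & SPEC =====
-- Pre_ is the representation invariant of the Python argument dict[str, set[str]]:
-- keys of the association list are distinct and each value list holds distinct elements
-- (duplicate keys / duplicate set members have no Python counterpart, so nothing is narrowed).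
def Pre_find_bidirectional_pairs (graph : List (String × List String)) : Prop :=
  (graph.map Prod.fst).Nodup ∧ ∀ p ∈ graph, p.2.Nodup
instance (graph : List (String × List String)) : Decidable (Pre_find_bidirectional_pairs graph) := by
  unfold Pre_find_bidirectional_pairs; infer_instance
def pvWitness_find_bidirectional_pairs : (List (String × List String)) :=
  [("a", ["b", "c"]), ("b", ["a"]), ("c", [])]

def Spec_find_bidirectional_pairs (graph : List (String × List String)) (out : List (String × String)) : Prop := out = find_bidirectional_pairs_alt graph
instance (graph : List (String × List String)) (out : List (String × String)) : Decidable (Spec_find_bidirectional_pairs graph out) := by unfold Spec_find_bidirectional_pairs; infer_instance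

-- ===== CLAIM (what is proved, stated in full; the proofs are below) =====
def Claim_equal_find_bidirectional_pairs : Prop := ∀ (graph : List (String × List String)), Dom_find_bidirectional_pairs graph → Pre_find_bidirectional_pairs graph → Spec_find_bidirectional_pairs graph (find_bidirectional_pairs graph)

-- ===== LEMMAS AND PROOFS =====

-- canonical (min, max) form of a non-loop edge
def pvCanon (s t : String) : String × String := if s < t then (s, t) else (t, s)

-- B's multiset of canonicalised non-loop directed edges
def pvEdges (graph : List (String × List String)) : List (String × String) :=
  graph.flatMap (fun p => (p.2.filter (fun t => decide (p.1 ≠ t))).map (fun t => pvCanon p.1 t))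

-- the value attached to a key (the empty list if absent)
def pvVal (graph : List (String × List String)) (k : String) : List String :=
  (PySem.Dict.mk graph).getD k []

-- the pairs both programs are after
def pvGood (graph : List (String × List String)) (x : String × String) : Prop :=
  x.1 < x.2 ∧ x.2 ∈ pvVal graph x.1 ∧ x.1 ∈ pvVal graph x.2

-- B's list before the final sort
def pvL (graph : List (String × List String)) : List (String × String) :=
  (PySem.Set.ofList (pvEdges graph)).filter
    (fun k => decide ((List.count k (pvEdges graph) : Int) = 2))

-- A's output, flattened
def pvAOut (graph : List (String × List String)) : List (String × String) :=
  (PySem.List.sorted (graph.map Prod.fst) (fun k => k) false).flatMap (fun s =>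
    ((PySem.List.sorted (pvVal graph s) (fun t => t) false).filter
       (fun t => decide (s < t) && (pvVal graph t).contains s)).map (fun t => (s, t)))

theorem pv_foldl_flatMap {α β δ : Type} (g : α → List β) (f : δ → β → δ) (l : List α) (init : δ) :
    (l.flatMap g).foldl f init = l.foldl (fun acc x => (g x).foldl f acc) init := by
  induction l generalizing init with
  | nil => rfl
  | cons h t ih => simp [List.flatMap_cons, List.foldl_append, ih]

theorem pvVal_cons (p : String × List String) (rest : List (String × List String)) (k : String) :
    pvVal (p :: rest) k = if p.1 = k then p.2 else pvVal rest k := by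
  obtain ⟨k0, v0⟩ := p
  simp only [pvVal, PySem.Dict.getD_eq_get?_getD, PySem.Dict.get?_mk_cons, beq_iff_eq]
  split <;> rfl

theorem pvVal_not_key (graph : List (String × List String)) (k : String)
    (h : k ∉ graph.map Prod.fst) : pvVal graph k = [] := by
  induction graph with
  | nil => rfl
  | cons p rest ih =>
    rw [pvVal_cons]
    simp only [List.map_cons, List.mem_cons, not_or] at h
    rw [if_neg (fun hc => h.1 hc.symm), ih h.2]

theorem pvVal_mem_keys (graph : List (String × List String)) (k : String)
    (h : pvVal graph k ≠ []) : k ∈ graph.map Prod.fst := by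
  by_contra hc
  exact h (pvVal_not_key graph k hc)

theorem pvVal_nodup (graph : List (String × List String))
    (h : ∀ p ∈ graph, p.2.Nodup) (k : String) : (pvVal graph k).Nodup := by
  induction graph with
  | nil => exact List.nodup_nil
  | cons p rest ih =>
    rw [pvVal_cons]
    split
    · exact h p (List.mem_cons_self)
    · exact ih (fun q hq => h q (List.mem_cons_of_mem _ hq))

theorem pvCanon_eq_iff {a b : String} (hab : a < b) (s t : String) :
    pvCanon s t = (a, b) ↔ (s = a ∧ t = b) ∨ (s = b ∧ t = a) := by
  unfold pvCanon
  split
  · next h =>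
    simp only [Prod.mk.injEq]
    constructor
    · rintro ⟨rfl, rfl⟩; exact Or.inl ⟨rfl, rfl⟩
    · rintro (⟨rfl, rfl⟩ | ⟨rfl, rfl⟩)
      · exact ⟨rfl, rfl⟩
      · exact absurd hab (lt_asymm h)
  · next h =>
    simp only [Prod.mk.injEq]
    constructor
    · rintro ⟨rfl, rfl⟩; exact Or.inr ⟨rfl, rfl⟩
    · rintro (⟨rfl, rfl⟩ | ⟨rfl, rfl⟩)
      · exact absurd hab h
      · exact ⟨rfl, rfl⟩

theorem pv_count_entry {a b : String} (hab : a < b) (s : String) (ts : List String) :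
    List.count (a, b) ((ts.filter (fun t => decide (s ≠ t))).map (fun t => pvCanon s t)) =
      if s = a then ts.count b else if s = b then ts.count a else 0 := by
  induction ts with
  | nil => simp
  | cons t ts ih =>
    have hab' : a ≠ b := ne_of_lt hab
    by_cases hst : s = t
    · rw [List.filter_cons_of_neg (by simp [hst]), ih]
      simp only [List.count_cons, beq_iff_eq]
      split_ifs <;> simp_all
    · rw [List.filter_cons_of_pos (by simpa using hst), List.map_cons, List.count_cons, ih]
      simp only [List.count_cons, beq_iff_eq, pvCanon_eq_iff hab]
      split_ifs <;> simp_all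

theorem pv_count_pvEdges {a b : String} (graph : List (String × List String))
    (h1 : (graph.map Prod.fst).Nodup) (hab : a < b) :
    List.count (a, b) (pvEdges graph) =
      (pvVal graph a).count b + (pvVal graph b).count a := by
  induction graph with
  | nil => simp [pvEdges, pvVal, PySem.Dict.getD_eq_get?_getD]; rfl
  | cons p rest ih =>
    simp only [List.map_cons, List.nodup_cons] at h1
    have hrest := ih h1.2
    have hab' : a ≠ b := ne_of_lt hab
    rw [show pvEdges (p :: rest) =
        ((p.2.filter (fun t => decide (p.1 ≠ t))).map (fun t => pvCanon p.1 t)) ++ pvEdges rest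
      from rfl]
    rw [List.count_append, pv_count_entry hab, hrest, pvVal_cons, pvVal_cons]
    by_cases hpa : p.1 = a
    · have hz : pvVal rest a = [] := pvVal_not_key rest a (hpa ▸ h1.1)
      simp [hpa, hab', hz]
    · by_cases hpb : p.1 = b
      · have hz : pvVal rest b = [] := pvVal_not_key rest b (hpb ▸ h1.1)
        simp [hpb, hz, (Ne.symm hab' : b ≠ a)]
        omega
      · simp [hpa, hpb]

theorem pv_mem_pvEdges_lt (graph : List (String × List String)) (x : String × String)
    (h : x ∈ pvEdges graph) : x.1 < x.2 := by
  simp only [pvEdges, List.mem_flatMap, List.mem_map, List.mem_filter] at h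
  obtain ⟨p, _, t, ⟨_, hne⟩, rfl⟩ := h
  have hne' : p.1 ≠ t := by simpa using hne
  unfold pvCanon
  split
  · next hlt => exact hlt
  · next hnlt => exact lt_of_le_of_ne (le_of_not_gt hnlt) (fun hc => hne' hc.symm)

theorem pv_mem_pvL_iff (graph : List (String × List String))
    (h1 : (graph.map Prod.fst).Nodup) (h2 : ∀ p ∈ graph, p.2.Nodup) (x : String × String) :
    x ∈ pvL graph ↔ pvGood graph x := by
  have hle1 : ∀ k, (pvVal graph k).Nodup := pvVal_nodup graph h2
  obtain ⟨a, b⟩ := x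
  simp only [pvL, List.mem_filter, PySem.Set.mem_ofList, decide_eq_true_eq]
  constructor
  · rintro ⟨hmem, hcnt⟩
    have hab : a < b := pv_mem_pvEdges_lt graph (a, b) hmem
    have hcnt' : List.count (a, b) (pvEdges graph) = 2 := by exact_mod_cast hcnt
    rw [pv_count_pvEdges graph h1 hab] at hcnt'
    have hca : (pvVal graph a).count b ≤ 1 := List.nodup_iff_count_le_one.1 (hle1 a) b
    have hcb : (pvVal graph b).count a ≤ 1 := List.nodup_iff_count_le_one.1 (hle1 b) a
    refine ⟨hab, ?_, ?_⟩
    · exact List.count_pos_iff.1 (show 0 < List.count b (pvVal graph a) by omega)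
    · exact List.count_pos_iff.1 (show 0 < List.count a (pvVal graph b) by omega)
  · rintro ⟨hab, hba, hbb⟩
    have hca : (pvVal graph a).count b = 1 :=
      Nat.le_antisymm (List.nodup_iff_count_le_one.1 (hle1 a) b) (List.count_pos_iff.2 hba)
    have hcb : (pvVal graph b).count a = 1 :=
      Nat.le_antisymm (List.nodup_iff_count_le_one.1 (hle1 b) a) (List.count_pos_iff.2 hbb)
    have hcnt : List.count (a, b) (pvEdges graph) = 2 := by
      rw [pv_count_pvEdges graph h1 hab, hca, hcb]
    refine ⟨List.count_pos_iff.1 (show 0 < List.count (a, b) (pvEdges graph) by omega), ?_⟩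
    exact_mod_cast hcnt

theorem pv_filterMap_map_count (l : List (String × String)) (c : String × String → Int) :
    (l.map (fun k => (k, c k))).filterMap
        (fun kn => if kn.2 = 2 then some kn.1 else none) =
      l.filter (fun k => decide (c k = 2)) := by
  induction l with
  | nil => rfl
  | cons x l ih =>
    simp only [List.map_cons, List.filterMap_cons, List.filter_cons]
    by_cases h : c x = 2 <;> simp [h, ih]

theorem pv_B_eq (graph : List (String × List String)) :
    find_bidirectional_pairs_alt graph =
      PySem.List.sorted2 (pvL graph) Prod.fst Prod.snd false := by
  unfold find_bidirectional_pairs_alt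
  have hinner : ∀ (p : String × List String) (d : PySem.Dict (String × String) Int),
      p.2.foldl (fun d target =>
        if p.1 ≠ target then
          let pair := if p.1 < target then (p.1, target) else (target, p.1)
          d.insert pair (d.getD pair 0 + 1)
        else d) d =
      ((p.2.filter (fun t => decide (p.1 ≠ t))).map (fun t => pvCanon p.1 t)).foldl
        (fun d x => d.insert x (d.getD x 0 + 1)) d := by
    intro p d
    rw [List.foldl_map, PySem.List.foldl_ite_eq_foldl_filter (fun t => p.1 ≠ t)]
    rfl
  have hcounts : graph.foldl (fun d p =>
      p.2.foldl (fun d target =>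
        if p.1 ≠ target then
          let pair := if p.1 < target then (p.1, target) else (target, p.1)
          d.insert pair (d.getD pair 0 + 1)
        else d) d) (PySem.Dict.empty : PySem.Dict (String × String) Int) =
      PySem.Dict.counter (pvEdges graph) := by
    rw [← PySem.Dict.foldl_insert_getD_add_one_eq_counter, pvEdges, pv_foldl_flatMap]
    exact PySem.List.foldl_congr_mem _ _ _ _ (fun d p _ => hinner p d)
  rw [hcounts]
  show PySem.List.sorted2 (List.filterMap (fun kn => if kn.2 = 2 then some kn.1 else none)
    (PySem.Dict.counter (pvEdges graph)).items) Prod.fst Prod.snd false =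
    PySem.List.sorted2 (pvL graph) Prod.fst Prod.snd false
  rw [PySem.Dict.items_counter, pv_filterMap_map_count]
  rfl

theorem pv_A_eq (graph : List (String × List String)) :
    find_bidirectional_pairs graph = pvAOut graph := by
  unfold find_bidirectional_pairs pvAOut
  simp only [PySem.Dict.keys_mk]
  have hinner : ∀ (s : String) (pairs : List (String × String)),
      (PySem.List.sorted (pvVal graph s) (fun t => t) false).foldl (fun pairs target =>
        let pair := if s < target then (s, target) else (target, s)
        if decide (s < target) && (pvVal graph target).contains s
        then pairs ++ [pair] else pairs) pairs =
      pairs ++ ((PySem.List.sorted (pvVal graph s) (fun t => t) false).filter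
        (fun t => decide (s < t) && (pvVal graph t).contains s)).map (fun t => (s, t)) := by
    intro s pairs
    rw [PySem.List.foldl_append_if (fun t => decide (s < t) && (pvVal graph t).contains s)
      (fun t => if s < t then (s, t) else (t, s))]
    congr 1
    apply List.map_congr_left
    intro t ht
    rw [List.mem_filter] at ht
    have hlt : s < t := by
      have := ht.2
      simp only [Bool.and_eq_true, decide_eq_true_eq] at this
      exact this.1
    rw [if_pos hlt]
  calc (PySem.List.sorted (graph.map (fun x => x.1)) (fun k => k) false).foldl
        (fun pairs source =>
          (PySem.List.sorted (pvVal graph source) (fun t => t) false).foldl (fun pairs target =>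
            let pair := if source < target then (source, target) else (target, source)
            if decide (source < target) && (pvVal graph target).contains source
            then pairs ++ [pair] else pairs) pairs) []
      = (PySem.List.sorted (graph.map (fun x => x.1)) (fun k => k) false).foldl
        (fun pairs source => pairs ++
          ((PySem.List.sorted (pvVal graph source) (fun t => t) false).filter
            (fun t => decide (source < t) && (pvVal graph t).contains source)).map
              (fun t => (source, t))) [] := by
        exact PySem.List.foldl_congr_mem _ _ _ _ (fun pairs s _ => hinner s pairs)
    _ = _ := by
        rw [PySem.List.foldl_append_eq_flatMap]
        simp [pvVal]

theorem pv_mem_AOut_iff (graph : List (String × List String)) (x : String × String) :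
    x ∈ pvAOut graph ↔ pvGood graph x := by
  obtain ⟨a, b⟩ := x
  simp only [pvAOut, List.mem_flatMap, List.mem_map, List.mem_filter,
    PySem.List.mem_sorted, Bool.and_eq_true, decide_eq_true_eq, Prod.mk.injEq]
  constructor
  · rintro ⟨s, hs, t, ⟨ht, hlt, hcont⟩, rfl, rfl⟩
    exact ⟨hlt, ht, by simpa using hcont⟩
  · rintro ⟨hab, hba, hbb⟩
    refine ⟨a, ?_, b, ⟨hba, hab, by simpa using hbb⟩, rfl, rfl⟩
    simpa using pvVal_mem_keys graph a (List.ne_nil_of_mem hba)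

theorem pv_pairwise_flatMap {α β : Type} (R : β → β → Prop) (g : α → List β) (l : List α)
    (h1 : l.Pairwise (fun a b => ∀ x ∈ g a, ∀ y ∈ g b, R x y))
    (h2 : ∀ a ∈ l, (g a).Pairwise R) :
    (l.flatMap g).Pairwise R := by
  induction l with
  | nil => exact List.Pairwise.nil
  | cons p rest ih =>
    rw [List.flatMap_cons, List.pairwise_append]
    rw [List.pairwise_cons] at h1
    refine ⟨h2 p List.mem_cons_self, ih h1.2 (fun q hq => h2 q (List.mem_cons_of_mem _ hq)), ?_⟩
    intro x hx y hy
    rw [List.mem_flatMap] at hy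
    obtain ⟨q, hq, hyq⟩ := hy
    exact h1.1 q hq x hx y hyq

theorem pv_sorted_pairwise_lt (xs : List String) (h : xs.Nodup) :
    (PySem.List.sorted xs (fun k => k) false).Pairwise (· < ·) := by
  have h1 := PySem.List.sorted_pairwise xs (fun k => k)
  have h2 : (PySem.List.sorted xs (fun k => k) false).Nodup :=
    ((PySem.List.sorted_perm xs (fun k => k) false).nodup_iff).2 h
  exact (h1.and h2).imp (fun hc => lt_of_le_of_ne hc.1 hc.2)

theorem pv_AOut_pairwise (graph : List (String × List String))
    (h1 : (graph.map Prod.fst).Nodup) (h2 : ∀ p ∈ graph, p.2.Nodup) :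
    (pvAOut graph).Pairwise (fun x y => toLex x < toLex y) := by
  unfold pvAOut
  apply pv_pairwise_flatMap
  · refine ((pv_sorted_pairwise_lt _ h1).imp ?_)
    intro s s' hss x hx y hy
    simp only [List.mem_map] at hx hy
    obtain ⟨t, _, rfl⟩ := hx
    obtain ⟨t', _, rfl⟩ := hy
    rw [Prod.Lex.toLex_lt_toLex]
    exact Or.inl hss
  · intro s _
    rw [List.pairwise_map]
    have hpw : ((PySem.List.sorted (pvVal graph s) (fun t => t) false).filter
        (fun t => decide (s < t) && (pvVal graph t).contains s)).Pairwise (· < ·) :=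
      List.Pairwise.sublist List.filter_sublist
        (pv_sorted_pairwise_lt _ (pvVal_nodup graph h2 s))
    refine hpw.imp ?_
    intro t t' htt
    rw [Prod.Lex.toLex_lt_toLex]
    exact Or.inr ⟨rfl, htt⟩

theorem pv_before_eq :
    (fun a b : String × String =>
        decide (a.1 < b.1) || (!decide (b.1 < a.1) && decide (a.2 < b.2))) =
      (fun a b : String × String => decide (toLex a < toLex b)) := by
  funext a b
  rcases lt_trichotomy a.1 b.1 with h | h | h
  · simp [Prod.Lex.toLex_lt_toLex, h]
  · simp [Prod.Lex.toLex_lt_toLex, h]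
  · simp [Prod.Lex.toLex_lt_toLex, h, lt_asymm h, (ne_of_gt h : a.1 ≠ b.1)]

theorem pv_sorted2_eq_sorted_toLex (xs : List (String × String)) :
    PySem.List.sorted2 xs Prod.fst Prod.snd false =
      PySem.List.sorted xs (fun x => toLex x) false := by
  rw [PySem.List.sorted_eq_foldl_insertBy]
  show xs.foldl (fun acc x => PySem.List.insertBy
      (fun a b : String × String =>
        decide (a.1 < b.1) || (!decide (b.1 < a.1) && decide (a.2 < b.2))) x acc) [] = _
  rw [pv_before_eq]

-- ===== VERDICT (by name: the statement is the Claim_ definition above) =====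
theorem find_bidirectional_pairs_spec : Claim_equal_find_bidirectional_pairs := by
  intro graph _ hpre
  obtain ⟨h1, h2⟩ := hpre
  unfold Spec_find_bidirectional_pairs
  rw [pv_A_eq, pv_B_eq, pv_sorted2_eq_sorted_toLex]
  have hnodA : (pvAOut graph).Nodup :=
    (pv_AOut_pairwise graph h1 h2).imp
      (fun hlt => fun hc => absurd (hc ▸ hlt) (lt_irrefl _))
  have hnodL : (pvL graph).Nodup :=
    List.Nodup.filter _ (PySem.Set.nodup_ofList (pvEdges graph))
  have hperm : (pvAOut graph).Perm (pvL graph) :=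
    (List.perm_ext_iff_of_nodup hnodA hnodL).2
      (fun x => (pv_mem_AOut_iff graph x).trans (pv_mem_pvL_iff graph h1 h2 x).symm)
  exact (PySem.List.sorted_eq_of_perm_of_pairwise_lt _ _ _ hperm
    (pv_AOut_pairwise graph h1 h2)).symm
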